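-- pv_equiv track=rewrite | github.com/rajpalsh-gif/Spatial-world | stepgame/pipeline.py | render_pruned_grid_str
-- ===== SOURCE A (Python) =====
-- from typing import List, Dict, Tuple, Optional, Any
--
-- def _bounds(coords: Dict[str, Tuple[int,int]]):
--     xs = [x for x,_ in coords.values()] or [0]
--     ys = [y for _,y in coords.values()] or [0]
--     return min(xs), max(xs), min(ys), max(ys)
--
-- def _build_token_grid(coords: Dict[str, Tuple[int,int]], keep: set = None):
--     if keep is not None:
--         coords = {s:xy for s,xy in coords.items() if s in keep}
--     if not coords:
--         return [[]], []
--     minx, maxx, miny, maxy = _bounds(coords)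
--     W = maxx - minx + 1; H = maxy - miny + 1
--     cell: Dict[Tuple[int,int], List[str]] = {}
--     for sym,(x,y) in coords.items():
--         cell.setdefault((x,y), []).append(sym)
--     for k in cell: cell[k].sort()
--     grid = []
--     for y in range(maxy, miny-1, -1):
--         row = []
--         for x in range(minx, maxx+1):
--             toks = cell.get((x,y), [])
--             row.append("/".join(toks) if toks else "_")
--         grid.append(row)
--     kept = sorted(coords.keys())
--     return grid, kept
--
-- def _render_labeled(grid: List[List[str]]) -> str:
--     if not grid or not grid[0]: return ""
--     H = len(grid)
--     header = "    " + "  ".join(f"C{j+1}" for j in range(len(grid[0])))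
--     lines = [header]
--     for i in range(H):
--         lines.append(f"R{i+1:<2}" + "  ".join(grid[i]))
--     return "\n".join(lines)
--
-- def render_pruned_grid_str(coords: Dict[str, Tuple[int,int]], keep_syms: Tuple[str,str]) -> str:
--     keep = {s for s in keep_syms if s}
--     grid, kept = _build_token_grid(coords, keep=keep)
--     if not kept or not grid or not grid[0]:
--         return "    C1\nR1  -"
--     H, W = len(grid), len(grid[0])
--     non_empty = [(i,j) for i in range(H) for j in range(W) if grid[i][j] != "_"]
--     if not non_empty:
--         return "    C1\nR1  -"
--     r0 = min(i for i,_ in non_empty); r1 = max(i for i,_ in non_empty)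
--     c0 = min(j for _,j in non_empty); c1 = max(j for _,j in non_empty)
--     cropped = [row[c0:c1+1] for row in grid[r0:r1+1]]
--     return _render_labeled(cropped)
-- ===== SOURCE B (Python) =====
-- def render_pruned_grid_str(coords, keep_syms):
--     keep = {s for s in keep_syms if s}
--     pts = {s: xy for s, xy in coords.items() if s in keep}
--     cell = {}
--     for s, (x, y) in pts.items():
--         cell.setdefault((x, y), []).append(s)
--     text = {p: "/".join(sorted(ts)) for p, ts in cell.items()}
--     vis = [p for p, t in text.items() if t != "_"]
--     if not vis:
--         return "    C1\nR1  -"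
--     minx = min(x for x, _ in vis); maxx = max(x for x, _ in vis)
--     miny = min(y for _, y in vis); maxy = max(y for _, y in vis)
--     lines = ["    " + "  ".join(f"C{j+1}" for j in range(maxx - minx + 1))]
--     for i, y in enumerate(range(maxy, miny - 1, -1)):
--         lines.append(f"R{i+1:<2}" + "  ".join(
--             text.get((x, y), "") or "_" for x in range(minx, maxx + 1)))
--     return "\n".join(lines)
-- ===== Notes on version B (the rewrite author's own statement) =====
-- stated objective: simpler
-- what changed: B never materialises the intermediate list-of-lists grid: it builds a (x,y)->rendered-text dict, computes the crop as the coordinate extremes of the cells whose text is not '_', and emits the final string in one pass over that cropped coordinate range, replacing A's grid construction, index-space non-empty scan and row/column slicing.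
import Mathlib
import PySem

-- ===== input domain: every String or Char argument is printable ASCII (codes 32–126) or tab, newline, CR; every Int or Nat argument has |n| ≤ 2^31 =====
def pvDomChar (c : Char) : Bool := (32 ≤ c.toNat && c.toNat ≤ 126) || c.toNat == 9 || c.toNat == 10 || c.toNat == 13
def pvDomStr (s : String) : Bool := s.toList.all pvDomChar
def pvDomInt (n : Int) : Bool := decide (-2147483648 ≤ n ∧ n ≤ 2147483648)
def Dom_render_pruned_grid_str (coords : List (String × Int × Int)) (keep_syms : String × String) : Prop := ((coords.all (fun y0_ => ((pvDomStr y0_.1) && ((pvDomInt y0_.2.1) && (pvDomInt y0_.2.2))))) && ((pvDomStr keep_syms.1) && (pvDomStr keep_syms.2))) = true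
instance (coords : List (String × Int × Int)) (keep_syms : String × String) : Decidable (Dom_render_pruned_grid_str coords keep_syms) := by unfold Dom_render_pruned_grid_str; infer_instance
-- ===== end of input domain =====

-- B renders the cropped grid directly from a per-cell text dict (crop = coordinate extremes of
-- cells whose text is not "_"), skipping A's intermediate list-of-lists grid and its index-space
-- non-empty scan and slicing; objective: simpler/alternative decomposition, same return value.

-- f"R{i+1:<2}": str(i+1) left-justified to width 2 (i+1 ≥ 1, so its str is nonempty)
def pvLjust2 (n : Int) : String :=
  let s := PySem.Int.toStr n
  if PySem.Str.len s < 2 then s ++ " " else s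

-- ===== PORT A =====
def pvBounds (coords : PySem.Dict String (Int × Int)) : Int × Int × Int × Int :=
  let xs := coords.values.map (fun p => p.1)
  let xs := if xs = [] then [0] else xs
  let ys := coords.values.map (fun p => p.2)
  let ys := if ys = [] then [0] else ys
  ((PySem.List.min? xs (fun v => v)).getD 0, (PySem.List.max? xs (fun v => v)).getD 0,
   (PySem.List.min? ys (fun v => v)).getD 0, (PySem.List.max? ys (fun v => v)).getD 0)

def pvBuildTokenGrid (coords0 : PySem.Dict String (Int × Int)) (keep : PySem.Set String) :
    List (List String) × List String :=
  let coords := PySem.Dict.ofList (coords0.items.filter (fun p => keep.contains p.1))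
  if coords.items = [] then ([[]], [])
  else
    let b := pvBounds coords
    let minx := b.1; let maxx := b.2.1; let miny := b.2.2.1; let maxy := b.2.2.2
    let cell : PySem.Dict (Int × Int) (List String) :=
      coords.items.foldl (fun c p => c.modify p.2 [] (fun l => l ++ [p.1])) PySem.Dict.empty
    let cell := cell.keys.foldl
      (fun c k => c.insert k (PySem.List.sorted (c.getD k []) (fun s => s) false)) cell
    let grid := (PySem.List.pyRange maxy (miny - 1) (-1)).foldl (fun g y =>
      g ++ [(PySem.List.pyRange minx (maxx + 1) 1).foldl (fun row x =>
        let toks := cell.getD (x, y) []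
        row ++ [if toks ≠ [] then PySem.Str.join "/" toks else "_"]) []]) []
    let kept := PySem.List.sorted coords.keys (fun s => s) false
    (grid, kept)

def pvRenderLabeled (grid : List (List String)) : String :=
  match grid with
  | [] => ""
  | g0 :: _ =>
    if g0 = [] then ""
    else
      let H := PySem.List.len grid
      let header := "    " ++ PySem.Str.join "  "
        ((PySem.List.pyRange 0 (PySem.List.len g0) 1).map (fun j => "C" ++ PySem.Int.toStr (j + 1)))
      let lines := (PySem.List.pyRange 0 H 1).foldl (fun ls i =>
        ls ++ ["R" ++ pvLjust2 (i + 1) ++ PySem.Str.join "  " (PySem.List.pyGetD grid i [])]) [header]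
      PySem.Str.join "\n" lines

def render_pruned_grid_str (coords : List (String × Int × Int)) (keep_syms : String × String) : String :=
  let keep : PySem.Set String := PySem.Set.ofList ([keep_syms.1, keep_syms.2].filter (fun s => s ≠ ""))
  let gk := pvBuildTokenGrid (PySem.Dict.ofList coords) keep
  let grid := gk.1
  let kept := gk.2
  if kept = [] ∨ grid = [] ∨ grid.headD [] = [] then "    C1\nR1  -"
  else
    let H := PySem.List.len grid
    let W := PySem.List.len (grid.headD [])
    let non_empty := (PySem.List.pyRange 0 H 1).foldl (fun acc i =>
      (PySem.List.pyRange 0 W 1).foldl (fun acc2 j =>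
        if PySem.List.pyGetD (PySem.List.pyGetD grid i []) j "" ≠ "_" then acc2 ++ [(i, j)] else acc2) acc) []
    if non_empty = [] then "    C1\nR1  -"
    else
      let r0 := (PySem.List.min? (non_empty.map (fun p => p.1)) (fun v => v)).getD 0
      let r1 := (PySem.List.max? (non_empty.map (fun p => p.1)) (fun v => v)).getD 0
      let c0 := (PySem.List.min? (non_empty.map (fun p => p.2)) (fun v => v)).getD 0
      let c1 := (PySem.List.max? (non_empty.map (fun p => p.2)) (fun v => v)).getD 0
      let cropped := (PySem.List.slice grid (some r0) (some (r1 + 1))).map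
        (fun row => PySem.List.slice row (some c0) (some (c1 + 1)))
      pvRenderLabeled cropped

-- ===== PORT B =====
def render_pruned_grid_str_alt (coords : List (String × Int × Int)) (keep_syms : String × String) : String :=
  let keep : PySem.Set String := PySem.Set.ofList ([keep_syms.1, keep_syms.2].filter (fun s => s ≠ ""))
  let pts := PySem.Dict.ofList ((PySem.Dict.ofList coords).items.filter (fun p => keep.contains p.1))
  let cell : PySem.Dict (Int × Int) (List String) :=
    pts.items.foldl (fun c p => c.modify p.2 [] (fun l => l ++ [p.1])) PySem.Dict.empty
  let text := PySem.Dict.ofList (cell.items.map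
    (fun p => (p.1, PySem.Str.join "/" (PySem.List.sorted p.2 (fun s => s) false))))
  let vis := (text.items.filter (fun p => p.2 ≠ "_")).map (fun p => p.1)
  if vis = [] then "    C1\nR1  -"
  else
    let minx := (PySem.List.min? (vis.map (fun p => p.1)) (fun v => v)).getD 0
    let maxx := (PySem.List.max? (vis.map (fun p => p.1)) (fun v => v)).getD 0
    let miny := (PySem.List.min? (vis.map (fun p => p.2)) (fun v => v)).getD 0
    let maxy := (PySem.List.max? (vis.map (fun p => p.2)) (fun v => v)).getD 0
    let lines := (PySem.List.enumerate (PySem.List.pyRange maxy (miny - 1) (-1)) 0).foldl (fun ls iy =>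
      ls ++ ["R" ++ pvLjust2 (iy.1 + 1) ++ PySem.Str.join "  "
        ((PySem.List.pyRange minx (maxx + 1) 1).map (fun x =>
          let t := PySem.Dict.getD text (x, iy.2) ""
          if t = "" then "_" else t))])
      ["    " ++ PySem.Str.join "  "
        ((PySem.List.pyRange 0 (maxx - minx + 1) 1).map (fun j => "C" ++ PySem.Int.toStr (j + 1)))]
    PySem.Str.join "\n" lines

-- ===== PRECONDITION & SPEC =====
def Spec_render_pruned_grid_str (coords : List (String × Int × Int)) (keep_syms : String × String) (out : String) : Prop := out = render_pruned_grid_str_alt coords keep_syms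
instance (coords : List (String × Int × Int)) (keep_syms : String × String) (out : String) : Decidable (Spec_render_pruned_grid_str coords keep_syms out) := by unfold Spec_render_pruned_grid_str; infer_instance

-- ===== CLAIM (what is proved, stated in full; the proofs are below) =====
def Claim_equal_render_pruned_grid_str : Prop := ∀ (coords : List (String × Int × Int)) (keep_syms : String × String), Dom_render_pruned_grid_str coords keep_syms → Spec_render_pruned_grid_str coords keep_syms (render_pruned_grid_str coords keep_syms)

-- ===== LEMMAS AND PROOFS =====

def pvCell (L : List (String × Int × Int)) : PySem.Dict (Int × Int) (List String) :=
  L.foldl (fun c p => c.modify p.2 [] (fun l => l ++ [p.1])) PySem.Dict.empty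

def pvToks (L : List (String × Int × Int)) (k : Int × Int) : List String :=
  (L.filter (fun p => p.2 == k)).map (fun p => p.1)

def pvSorted (ts : List String) : List String := PySem.List.sorted ts (fun s => s) false

def pvText (L : List (String × Int × Int)) (k : Int × Int) : String :=
  PySem.Str.join "/" (pvSorted (pvToks L k))

def pvACell (L : List (String × Int × Int)) (k : Int × Int) : String :=
  if pvToks L k ≠ [] then pvText L k else "_"

def pvTextDict (L : List (String × Int × Int)) : PySem.Dict (Int × Int) String :=
  PySem.Dict.ofList ((pvCell L).items.map
    (fun p => (p.1, PySem.Str.join "/" (PySem.List.sorted p.2 (fun s => s) false))))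

lemma pv_items_ofList {κ ν : Type} [BEq κ] [LawfulBEq κ] (L : List (κ × ν))
    (h : (L.map (fun p => p.1)).Nodup) : (PySem.Dict.ofList L).items = L := by
  show (List.foldl (fun d p => d.insert p.1 p.2) PySem.Dict.empty L).items = L
  have := PySem.Dict.items_foldl_insert_fresh L (fun p => p.1) (fun p => p.2) PySem.Dict.empty
    (by intro a _; simp [PySem.Dict.contains_iff_mem_keys, PySem.Dict.keys_empty]) h
  simpa using this

lemma pv_cell_getD (L : List (String × Int × Int)) (k : Int × Int) :
    (pvCell L).getD k [] = pvToks L k := by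
  unfold pvCell pvToks
  have hfold : L.foldl (fun c p => c.modify p.2 [] (fun l => l ++ [p.1])) PySem.Dict.empty
      = (L.map (fun p => (p.2, p.1))).foldl (fun c q => c.modify q.1 [] (fun l => l ++ [q.2])) PySem.Dict.empty := by
    rw [List.foldl_map]
  rw [hfold, PySem.Dict.getD_foldl_modify_append, PySem.Dict.getD_empty]
  simp [List.filter_map, List.map_map, Function.comp_def]

lemma pv_cell_keys (L : List (String × Int × Int)) :
    (pvCell L).keys = PySem.Set.ofList (L.map (fun p => p.2)) := by
  unfold pvCell
  rw [PySem.Dict.keys_foldl_modify_key L (fun p => p.2) [] (fun c p l => l ++ [p.1]) PySem.Dict.empty]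
  rw [PySem.Dict.keys_empty]
  exact PySem.Set.update_empty _

lemma pv_cell_keys_nodup (L : List (String × Int × Int)) : (pvCell L).keys.Nodup := by
  unfold pvCell
  exact PySem.Dict.nodup_keys_foldl_modify_key L (fun p => p.2) [] (fun c p l => l ++ [p.1])
    PySem.Dict.empty (by simp [PySem.Dict.keys_empty])

lemma pv_mem_cell_keys (L : List (String × Int × Int)) (k : Int × Int) :
    k ∈ (pvCell L).keys ↔ pvToks L k ≠ [] := by
  rw [pv_cell_keys, PySem.Set.mem_ofList]
  constructor
  · intro hm
    rcases List.mem_map.mp hm with ⟨p, hp, hpk⟩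
    intro hnil
    have hmem : p.1 ∈ pvToks L k := by
      unfold pvToks
      exact List.mem_map.mpr ⟨p, List.mem_filter.mpr ⟨hp, by simp [hpk]⟩, rfl⟩
    simp [hnil] at hmem
  · intro hne
    have hf : L.filter (fun p => p.2 == k) ≠ [] := by
      intro h0; apply hne; unfold pvToks; rw [h0]; rfl
    rcases List.exists_mem_of_ne_nil _ hf with ⟨p, hp⟩
    have hp' := List.mem_filter.mp hp
    exact List.mem_map.mpr ⟨p, hp'.1, by simpa using hp'.2⟩

lemma pv_sortfold_getD {κ : Type} [BEq κ] [LawfulBEq κ] (ks : List κ)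
    (c : PySem.Dict κ (List String)) (hnd : ks.Nodup) (k : κ) :
    (ks.foldl (fun c k => c.insert k (PySem.List.sorted (c.getD k []) (fun s => s) false)) c).getD k []
      = if k ∈ ks then PySem.List.sorted (c.getD k []) (fun s => s) false else c.getD k [] := by
  induction ks generalizing c with
  | nil => simp
  | cons k0 ks ih =>
    simp only [List.foldl_cons]
    rcases List.nodup_cons.mp hnd with ⟨hk0, hnd'⟩
    rw [ih _ hnd']
    by_cases hk : k = k0
    · subst hk
      simp [hk0, PySem.Dict.getD_insert_self]
    · rw [PySem.Dict.getD_insert_of_ne _ _ _ hk]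
      simp [List.mem_cons, hk]

lemma pv_cellS_getD (L : List (String × Int × Int)) (k : Int × Int) :
    ((pvCell L).keys.foldl
        (fun c k => c.insert k (PySem.List.sorted (c.getD k []) (fun s => s) false)) (pvCell L)).getD k []
      = pvSorted (pvToks L k) := by
  rw [pv_sortfold_getD _ _ (pv_cell_keys_nodup L) k]
  by_cases h : k ∈ (pvCell L).keys
  · simp [h, pv_cell_getD, pvSorted]
  · have : pvToks L k = [] := by
      by_contra hne; exact h ((pv_mem_cell_keys L k).mpr hne)
    rw [if_neg h, pv_cell_getD, this, pvSorted]
    exact ((PySem.List.sorted_eq_nil_iff ([] : List String) (fun s => s) false).mpr rfl).symm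

lemma pv_cell_items (L : List (String × Int × Int)) :
    (pvCell L).items = (pvCell L).keys.map (fun k => (k, pvToks L k)) := by
  have := PySem.Dict.items_eq_map_keys (pvCell L) (pv_cell_keys_nodup L) []
  rw [this]
  exact List.map_congr_left (fun k _ => by rw [pv_cell_getD])

lemma pv_textDict_items (L : List (String × Int × Int)) :
    (pvTextDict L).items = (pvCell L).keys.map (fun k => (k, pvText L k)) := by
  unfold pvTextDict
  rw [pv_cell_items, List.map_map]
  rw [pv_items_ofList]
  · exact List.map_congr_left (fun k _ => by simp [Function.comp_def, pvText, pvSorted])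
  · simp only [List.map_map, Function.comp_def]
    simpa using pv_cell_keys_nodup L

lemma pv_textDict_getD (L : List (String × Int × Int)) (k : Int × Int) :
    (pvTextDict L).getD k "" = if pvToks L k ≠ [] then pvText L k else "" := by
  by_cases h : pvToks L k ≠ []
  · have hk : k ∈ (pvCell L).keys := (pv_mem_cell_keys L k).mpr h
    have hmem : (k, pvText L k) ∈ (pvTextDict L).items := by
      rw [pv_textDict_items]; exact List.mem_map.mpr ⟨k, hk, rfl⟩
    have hnd : (pvTextDict L).keys.Nodup := by
      have : (pvTextDict L).keys = (pvCell L).keys := by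
        show (pvTextDict L).items.map (fun p => p.1) = _
        rw [pv_textDict_items, List.map_map]; simp [Function.comp_def]
      rw [this]; exact pv_cell_keys_nodup L
    simp [h, PySem.Dict.getD_of_mem_items _ hmem hnd]
  · have hk : k ∉ (pvCell L).keys := fun hm => h ((pv_mem_cell_keys L k).mp hm)
    have hcont : (pvTextDict L).contains k = false := by
      rw [← Bool.not_eq_true, PySem.Dict.contains_iff_mem_keys]
      intro hm
      apply hk
      have : (pvTextDict L).keys = (pvCell L).keys := by
        show (pvTextDict L).items.map (fun p => p.1) = _
        rw [pv_textDict_items, List.map_map]; simp [Function.comp_def]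
      rwa [this] at hm
    simp [h, PySem.Dict.getD_of_not_contains _ _ hcont]

def pvMinX (L : List (String × Int × Int)) : Int :=
  (PySem.List.min? (L.map (fun p => p.2.1)) (fun v => v)).getD 0
def pvMaxX (L : List (String × Int × Int)) : Int :=
  (PySem.List.max? (L.map (fun p => p.2.1)) (fun v => v)).getD 0
def pvMinY (L : List (String × Int × Int)) : Int :=
  (PySem.List.min? (L.map (fun p => p.2.2)) (fun v => v)).getD 0
def pvMaxY (L : List (String × Int × Int)) : Int :=
  (PySem.List.max? (L.map (fun p => p.2.2)) (fun v => v)).getD 0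

lemma pv_min_int (xs : List Int) (h : xs ≠ []) :
    ((PySem.List.min? xs (fun v => v)).getD 0) ∈ xs ∧
      ∀ y ∈ xs, ((PySem.List.min? xs (fun v => v)).getD 0) ≤ y := by
  cases hm : PySem.List.min? xs (fun v => v) with
  | none => exact absurd ((PySem.List.min?_eq_none_iff _ _).mp hm) h
  | some m =>
    refine ⟨by simpa [hm] using PySem.List.min?_mem hm, ?_⟩
    intro y hy; simpa [hm] using PySem.List.min?_isMin hm y hy

lemma pv_max_int (xs : List Int) (h : xs ≠ []) :
    ((PySem.List.max? xs (fun v => v)).getD 0) ∈ xs ∧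
      ∀ y ∈ xs, y ≤ ((PySem.List.max? xs (fun v => v)).getD 0) := by
  cases hm : PySem.List.max? xs (fun v => v) with
  | none => exact absurd ((PySem.List.max?_eq_none_iff _ _).mp hm) h
  | some m =>
    refine ⟨by simpa [hm] using PySem.List.max?_mem hm, ?_⟩
    intro y hy; simpa [hm] using PySem.List.max?_isMax hm y hy

lemma pv_acell_eq (L : List (String × Int × Int)) (k : Int × Int) :
    (if PySem.List.sorted (pvToks L k) (fun s => s) false ≠ [] then
        PySem.Str.join "/" (PySem.List.sorted (pvToks L k) (fun s => s) false) else "_")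
      = pvACell L k := by
  unfold pvACell pvText pvSorted
  by_cases h : pvToks L k = [] <;> simp [h, PySem.List.sorted_eq_nil_iff]

lemma pv_build_eq (coords0 : PySem.Dict String (Int × Int)) (keep : PySem.Set String)
    (L : List (String × Int × Int))
    (hLdef : coords0.items.filter (fun p => keep.contains p.1) = L)
    (hnd : (L.map (fun p => p.1)).Nodup) (hL : L ≠ []) :
    pvBuildTokenGrid coords0 keep =
      ((PySem.List.pyRange (pvMaxY L) (pvMinY L - 1) (-1)).map (fun y =>
        (PySem.List.pyRange (pvMinX L) (pvMaxX L + 1) 1).map (fun x => pvACell L (x, y))),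
       pvSorted (L.map (fun p => p.1))) := by
  unfold pvBuildTokenGrid
  rw [hLdef]
  have hitems : (PySem.Dict.ofList L).items = L := pv_items_ofList L hnd
  simp only [hitems, if_neg hL]
  have hkeys : (PySem.Dict.ofList L).keys = L.map (fun p => p.1) := by
    show (PySem.Dict.ofList L).items.map _ = _
    rw [hitems]
  have hvals : (PySem.Dict.ofList L).values = L.map (fun p => p.2) := by
    show (PySem.Dict.ofList L).items.map _ = _
    rw [hitems]
  have hb : pvBounds (PySem.Dict.ofList L) = (pvMinX L, pvMaxX L, pvMinY L, pvMaxY L) := by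
    unfold pvBounds
    have hxs : (PySem.Dict.ofList L).values.map (fun p => p.1) = L.map (fun p => p.2.1) := by
      rw [hvals, List.map_map]; rfl
    have hys : (PySem.Dict.ofList L).values.map (fun p => p.2) = L.map (fun p => p.2.2) := by
      rw [hvals, List.map_map]; rfl
    have hxne : L.map (fun p => p.2.1) ≠ [] := by simpa using hL
    have hyne : L.map (fun p => p.2.2) ≠ [] := by simpa using hL
    simp only [hxs, hys, if_neg hxne, if_neg hyne]
    rfl
  rw [hb]
  simp only [PySem.List.foldl_append_singleton_eq_map, List.nil_append]
  congr 1
  · apply List.map_congr_left; intro y _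
    apply List.map_congr_left; intro x _
    show (if ((pvCell L).keys.foldl
        (fun c k => c.insert k (PySem.List.sorted (c.getD k []) (fun s => s) false)) (pvCell L)).getD (x, y) [] ≠ [] then
          PySem.Str.join "/" (((pvCell L).keys.foldl
        (fun c k => c.insert k (PySem.List.sorted (c.getD k []) (fun s => s) false)) (pvCell L)).getD (x, y) [])
        else "_") = _
    rw [pv_cellS_getD]
    exact pv_acell_eq L (x, y)
  · rw [hkeys]; rfl

lemma pv_toList_empty (s : String) (h : s.toList = []) : s = "" :=
  String.toList_inj.mp (by simpa using h)

lemma pv_join_ne_empty (ts : List String) (hne : ts ≠ []) (hall : ∀ s ∈ ts, s ≠ "") :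
    PySem.Str.join "/" ts ≠ "" := by
  intro h
  have h' := congrArg String.toList h
  rw [PySem.Str.toList_join] at h'
  match ts, hne, hall with
  | [a], _, hall =>
    rw [List.map_cons, List.map_nil, PySem.Chars.join_singleton] at h'
    exact hall a (by simp) (pv_toList_empty a (by simpa using h'))
  | a :: b :: rest, _, hall =>
    rw [List.map_cons, List.map_cons, PySem.Chars.join_cons_cons] at h'
    simp only [String.toList_empty, List.append_eq_nil_iff] at h'
    exact hall a (by simp) (pv_toList_empty a h'.1.1)

lemma pv_text_ne (L : List (String × Int × Int)) (hs : ∀ p ∈ L, p.1 ≠ "")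
    (k : Int × Int) (h : pvToks L k ≠ []) : pvText L k ≠ "" := by
  apply pv_join_ne_empty
  · unfold pvSorted; rw [Ne, PySem.List.sorted_eq_nil_iff]; exact h
  · intro s hsm
    have : s ∈ pvToks L k := (PySem.List.mem_sorted _ _ _ _).mp hsm
    rcases List.mem_map.mp this with ⟨p, hp, rfl⟩
    exact hs p (List.mem_filter.mp hp).1

lemma pv_bcell_eq (L : List (String × Int × Int)) (hs : ∀ p ∈ L, p.1 ≠ "") (k : Int × Int) :
    (if (pvTextDict L).getD k "" = "" then "_" else (pvTextDict L).getD k "") = pvACell L k := by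
  rw [pv_textDict_getD]
  by_cases h : pvToks L k = []
  · simp [h, pvACell]
  · simp only [h, if_neg, pvACell, ite_not]
    simp [pv_text_ne L hs k h, h]

def pvVis (L : List (String × Int × Int)) : List (Int × Int) :=
  ((pvTextDict L).items.filter (fun p => p.2 ≠ "_")).map (fun p => p.1)

lemma pv_vis_eq (L : List (String × Int × Int)) :
    pvVis L = (pvCell L).keys.filter (fun k => pvText L k ≠ "_") := by
  unfold pvVis
  rw [pv_textDict_items, List.filter_map, List.map_map]
  simp [Function.comp_def]

lemma pv_mem_vis (L : List (String × Int × Int)) (k : Int × Int) :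
    k ∈ pvVis L ↔ (pvToks L k ≠ [] ∧ pvText L k ≠ "_") := by
  rw [pv_vis_eq, List.mem_filter, pv_mem_cell_keys]
  simp

lemma pv_slice_range_map {α : Type} (g : Nat → α) {n : Nat} {a b : Int}
    (h0 : 0 ≤ a) (hab : a ≤ b) (hbn : b.toNat ≤ n) :
    PySem.List.slice ((List.range n).map g) (some a) (some b)
      = (List.range (b.toNat - a.toNat)).map (fun k => g (a.toNat + k)) := by
  rw [PySem.List.slice_toNat _ h0 (le_trans h0 hab)]
  apply List.ext_getElem
  · simp; omega
  · intro i h1 h2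
    simp [List.getElem_take, List.getElem_drop]

def pvKeep (ks : String × String) : PySem.Set String :=
  PySem.Set.ofList ([ks.1, ks.2].filter (fun s => s ≠ ""))

def pvLof (coords : List (String × Int × Int)) (ks : String × String) : List (String × Int × Int) :=
  (PySem.Dict.ofList coords).items.filter (fun p => (pvKeep ks).contains p.1)

def pvRowA (L : List (String × Int × Int)) (y : Int) : List String :=
  (PySem.List.pyRange (pvMinX L) (pvMaxX L + 1) 1).map (fun x => pvACell L (x, y))

def pvGridA (L : List (String × Int × Int)) : List (List String) :=
  (PySem.List.pyRange (pvMaxY L) (pvMinY L - 1) (-1)).map (pvRowA L)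

def pvNE0 (L : List (String × Int × Int)) : List (Int × Int) :=
  (PySem.List.pyRange 0 (PySem.List.len (pvGridA L)) 1).foldl (fun acc i =>
    (PySem.List.pyRange 0 (PySem.List.len ((pvGridA L).headD [])) 1).foldl (fun acc2 j =>
      if PySem.List.pyGetD (PySem.List.pyGetD (pvGridA L) i []) j "" ≠ "_" then acc2 ++ [(i, j)]
      else acc2) acc) []

def pvR0 (L : List (String × Int × Int)) : Int :=
  (PySem.List.min? ((pvNE0 L).map (fun p => p.1)) (fun v => v)).getD 0
def pvR1 (L : List (String × Int × Int)) : Int :=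
  (PySem.List.max? ((pvNE0 L).map (fun p => p.1)) (fun v => v)).getD 0
def pvC0 (L : List (String × Int × Int)) : Int :=
  (PySem.List.min? ((pvNE0 L).map (fun p => p.2)) (fun v => v)).getD 0
def pvC1 (L : List (String × Int × Int)) : Int :=
  (PySem.List.max? ((pvNE0 L).map (fun p => p.2)) (fun v => v)).getD 0

def pvCanonA (L : List (String × Int × Int)) : String :=
  if L = [] then "    C1\nR1  -"
  else
    if pvSorted (L.map (fun p => p.1)) = [] ∨ pvGridA L = [] ∨ (pvGridA L).headD [] = [] then
      "    C1\nR1  -"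
    else
      if pvNE0 L = [] then "    C1\nR1  -"
      else
        pvRenderLabeled ((PySem.List.slice (pvGridA L) (some (pvR0 L)) (some (pvR1 L + 1))).map
          (fun row => PySem.List.slice row (some (pvC0 L)) (some (pvC1 L + 1))))

def pvVx (L : List (String × Int × Int)) : Int :=
  (PySem.List.min? ((pvVis L).map (fun p => p.1)) (fun v => v)).getD 0
def pvVX (L : List (String × Int × Int)) : Int :=
  (PySem.List.max? ((pvVis L).map (fun p => p.1)) (fun v => v)).getD 0
def pvVy (L : List (String × Int × Int)) : Int :=
  (PySem.List.min? ((pvVis L).map (fun p => p.2)) (fun v => v)).getD 0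
def pvVY (L : List (String × Int × Int)) : Int :=
  (PySem.List.max? ((pvVis L).map (fun p => p.2)) (fun v => v)).getD 0

def pvCanonB (L : List (String × Int × Int)) : String :=
  if pvVis L = [] then "    C1\nR1  -"
  else
    PySem.Str.join "\n"
      ((PySem.List.enumerate (PySem.List.pyRange (pvVY L) (pvVy L - 1) (-1)) 0).foldl (fun ls iy =>
        ls ++ ["R" ++ pvLjust2 (iy.1 + 1) ++ PySem.Str.join "  "
          ((PySem.List.pyRange (pvVx L) (pvVX L + 1) 1).map (fun x =>
            let t := PySem.Dict.getD (pvTextDict L) (x, iy.2) ""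
            if t = "" then "_" else t))])
        ["    " ++ PySem.Str.join "  "
          ((PySem.List.pyRange 0 (pvVX L - pvVx L + 1) 1).map (fun j => "C" ++ PySem.Int.toStr (j + 1)))])

lemma pv_nodup_Lof (coords : List (String × Int × Int)) (ks : String × String) :
    ((pvLof coords ks).map (fun p => p.1)).Nodup := by
  have h1 : (PySem.Dict.ofList coords).keys.Nodup := PySem.Dict.nodup_keys_ofList coords
  have h2 : List.Sublist ((pvLof coords ks).map (fun p => p.1))
      ((PySem.Dict.ofList coords).items.map (fun p => p.1)) :=
    List.Sublist.map _ List.filter_sublist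
  exact (show ((PySem.Dict.ofList coords).items.map (fun p => p.1)).Nodup from h1).sublist h2

lemma pv_Lof_sym_ne (coords : List (String × Int × Int)) (ks : String × String) :
    ∀ p ∈ pvLof coords ks, p.1 ≠ "" := by
  intro p hp
  have := (List.mem_filter.mp hp).2
  have hmem : p.1 ∈ pvKeep ks := by
    simpa [List.contains_iff_mem] using this
  have := PySem.Set.mem_ofList _ _ |>.mp hmem
  simpa using (List.mem_filter.mp this).2

lemma pv_A_eq (coords : List (String × Int × Int)) (ks : String × String) :
    render_pruned_grid_str coords ks = pvCanonA (pvLof coords ks) := by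
  simp only [render_pruned_grid_str]
  by_cases hL : pvLof coords ks = []
  · have hb : pvBuildTokenGrid (PySem.Dict.ofList coords)
        (PySem.Set.ofList ([ks.1, ks.2].filter (fun s => s ≠ ""))) = ([[]], []) := by
      unfold pvBuildTokenGrid
      rw [show (PySem.Dict.ofList coords).items.filter
          (fun p => (PySem.Set.ofList ([ks.1, ks.2].filter (fun s => s ≠ ""))).contains p.1)
          = pvLof coords ks from rfl, hL]
      simp [pv_items_ofList ([] : List (String × Int × Int)) (by simp)]
    rw [hb]
    simp [pvCanonA, hL]
  · rw [pv_build_eq (PySem.Dict.ofList coords)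
      (PySem.Set.ofList ([ks.1, ks.2].filter (fun s => s ≠ ""))) (pvLof coords ks) rfl
      (pv_nodup_Lof coords ks) hL]
    rw [pvCanonA, if_neg hL]
    rfl

lemma pv_B_eq (coords : List (String × Int × Int)) (ks : String × String) :
    render_pruned_grid_str_alt coords ks = pvCanonB (pvLof coords ks) := by
  simp only [render_pruned_grid_str_alt]
  rw [show (PySem.Dict.ofList ((PySem.Dict.ofList coords).items.filter
      (fun p => (PySem.Set.ofList ([ks.1, ks.2].filter (fun s => s ≠ ""))).contains p.1))).items
      = pvLof coords ks from pv_items_ofList _ (pv_nodup_Lof coords ks)]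
  rfl

lemma pv_acell_ne_iff (L : List (String × Int × Int)) (k : Int × Int) :
    pvACell L k ≠ "_" ↔ k ∈ pvVis L := by
  rw [pv_mem_vis]
  unfold pvACell
  by_cases h : pvToks L k = [] <;> simp [h]

lemma pv_toks_mem_L (L : List (String × Int × Int)) (k : Int × Int)
    (h : pvToks L k ≠ []) : ∃ p ∈ L, p.2 = k := by
  unfold pvToks at h
  have hf : L.filter (fun p => p.2 == k) ≠ [] := fun h0 => h (by rw [h0]; rfl)
  rcases List.exists_mem_of_ne_nil _ hf with ⟨p, hp⟩
  have hp' := List.mem_filter.mp hp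
  exact ⟨p, hp'.1, by simpa using hp'.2⟩

lemma pv_bounds_le (L : List (String × Int × Int)) (hL : L ≠ []) :
    pvMinX L ≤ pvMaxX L ∧ pvMinY L ≤ pvMaxY L ∧
    ∀ p ∈ L, pvMinX L ≤ p.2.1 ∧ p.2.1 ≤ pvMaxX L ∧ pvMinY L ≤ p.2.2 ∧ p.2.2 ≤ pvMaxY L := by
  have hxne : L.map (fun p => p.2.1) ≠ [] := by simpa using hL
  have hyne : L.map (fun p => p.2.2) ≠ [] := by simpa using hL
  have hminx := pv_min_int _ hxne
  have hmaxx := pv_max_int _ hxne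
  have hminy := pv_min_int _ hyne
  have hmaxy := pv_max_int _ hyne
  refine ⟨hmaxx.2 _ hminx.1, hmaxy.2 _ hminy.1, ?_⟩
  intro p hp
  exact ⟨hminx.2 _ (List.mem_map.mpr ⟨p, hp, rfl⟩), hmaxx.2 _ (List.mem_map.mpr ⟨p, hp, rfl⟩),
    hminy.2 _ (List.mem_map.mpr ⟨p, hp, rfl⟩), hmaxy.2 _ (List.mem_map.mpr ⟨p, hp, rfl⟩)⟩

lemma pv_vis_bounds (L : List (String × Int × Int)) (hL : L ≠ []) (k : Int × Int)
    (h : k ∈ pvVis L) :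
    pvMinX L ≤ k.1 ∧ k.1 ≤ pvMaxX L ∧ pvMinY L ≤ k.2 ∧ k.2 ≤ pvMaxY L := by
  rcases (pv_mem_vis L k).mp h with ⟨htoks, _⟩
  rcases pv_toks_mem_L L k htoks with ⟨p, hp, hpk⟩
  have := (pv_bounds_le L hL).2.2 p hp
  rw [hpk] at this
  exact this

def pvHN (L : List (String × Int × Int)) : Nat := (pvMaxY L - (pvMinY L - 1)).toNat
def pvWN (L : List (String × Int × Int)) : Nat := (pvMaxX L + 1 - pvMinX L).toNat

lemma pv_row_repr (L : List (String × Int × Int)) (y : Int) :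
    pvRowA L y = (List.range (pvWN L)).map (fun (c : Nat) => pvACell L (pvMinX L + (c : Int), y)) := by
  unfold pvRowA pvWN
  rw [PySem.List.pyRange_one, List.map_map]
  rfl

lemma pv_grid_repr (L : List (String × Int × Int)) :
    pvGridA L = (List.range (pvHN L)).map (fun (r : Nat) => pvRowA L (pvMaxY L - (r : Int))) := by
  unfold pvGridA pvHN
  rw [PySem.List.pyRange_neg_one, List.map_map]
  rfl

lemma pv_row_len (L : List (String × Int × Int)) (y : Int) :
    (pvRowA L y).length = pvWN L := by
  rw [pv_row_repr]; simp

lemma pv_grid_len (L : List (String × Int × Int)) :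
    (pvGridA L).length = pvHN L := by
  rw [pv_grid_repr]; simp

lemma pv_grid_getD (L : List (String × Int × Int)) (i : Int) (h0 : 0 ≤ i)
    (hi : i < pvHN L) :
    PySem.List.pyGetD (pvGridA L) i [] = pvRowA L (pvMaxY L - i) := by
  rw [pv_grid_repr, PySem.List.pyGetD_of_nonneg _ _ h0]
  have hlt : i.toNat < pvHN L := by omega
  rw [List.getD_eq_getElem?_getD]
  simp only [List.getElem?_map, List.getElem?_range, hlt, if_pos]
  simp [Int.toNat_of_nonneg h0]

lemma pv_row_getD (L : List (String × Int × Int)) (y : Int) (j : Int) (h0 : 0 ≤ j)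
    (hj : j < pvWN L) :
    PySem.List.pyGetD (pvRowA L y) j "" = pvACell L (pvMinX L + j, y) := by
  rw [pv_row_repr, PySem.List.pyGetD_of_nonneg _ _ h0]
  have hlt : j.toNat < pvWN L := by omega
  rw [List.getD_eq_getElem?_getD]
  simp only [List.getElem?_map, List.getElem?_range, hlt, if_pos]
  simp [Int.toNat_of_nonneg h0]

def pvNE (L : List (String × Int × Int)) : List (Int × Int) :=
  (PySem.List.pyRange 0 (PySem.List.len (pvGridA L)) 1).flatMap (fun i =>
    ((PySem.List.pyRange 0 (PySem.List.len ((pvGridA L).headD [])) 1).filter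
      (fun j => decide (PySem.List.pyGetD (PySem.List.pyGetD (pvGridA L) i []) j "" ≠ "_"))).map (fun j => (i, j)))

lemma pv_NE_eq (L : List (String × Int × Int)) :
    (PySem.List.pyRange 0 (PySem.List.len (pvGridA L)) 1).foldl (fun acc i =>
      (PySem.List.pyRange 0 (PySem.List.len ((pvGridA L).headD [])) 1).foldl (fun acc2 j =>
        if PySem.List.pyGetD (PySem.List.pyGetD (pvGridA L) i []) j "" ≠ "_" then acc2 ++ [(i, j)]
        else acc2) acc) []
    = pvNE L := by
  simp only [PySem.List.foldl_append_ite]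
  rw [PySem.List.foldl_append_eq_flatMap]
  rfl

lemma pv_len_grid_int (L : List (String × Int × Int)) :
    PySem.List.len (pvGridA L) = (pvHN L : Int) := by
  rw [PySem.List.len_eq, pv_grid_len]

lemma pv_head_grid (L : List (String × Int × Int)) (hYY : pvMinY L ≤ pvMaxY L) :
    (pvGridA L).headD [] = pvRowA L (pvMaxY L) := by
  rw [pv_grid_repr]
  have : pvHN L = (pvHN L - 1) + 1 := by unfold pvHN; omega
  rw [this, List.range_succ_eq_map]
  simp

lemma pv_len_head_int (L : List (String × Int × Int)) (hYY : pvMinY L ≤ pvMaxY L) :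
    PySem.List.len ((pvGridA L).headD []) = (pvWN L : Int) := by
  rw [pv_head_grid L hYY, PySem.List.len_eq, pv_row_len]

lemma pv_mem_NE (L : List (String × Int × Int)) (hYY : pvMinY L ≤ pvMaxY L)
    (p : Int × Int) :
    p ∈ pvNE L ↔ 0 ≤ p.1 ∧ p.1 < (pvHN L : Int) ∧ 0 ≤ p.2 ∧ p.2 < (pvWN L : Int) ∧
      (pvMinX L + p.2, pvMaxY L - p.1) ∈ pvVis L := by
  unfold pvNE
  rw [pv_len_grid_int, pv_len_head_int L hYY]
  constructor
  · intro hp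
    rcases List.mem_flatMap.mp hp with ⟨i, hi, hpi⟩
    rcases List.mem_map.mp hpi with ⟨j, hj, rfl⟩
    have hj' := List.mem_filter.mp hj
    have hiR := PySem.List.mem_pyRange_one.mp hi
    have hjR := PySem.List.mem_pyRange_one.mp hj'.1
    refine ⟨hiR.1, hiR.2, hjR.1, hjR.2, ?_⟩
    have hq := of_decide_eq_true hj'.2
    rw [pv_grid_getD L i hiR.1 hiR.2, pv_row_getD L _ j hjR.1 hjR.2] at hq
    exact (pv_acell_ne_iff L _).mp hq
  · rintro ⟨h1, h2, h3, h4, h5⟩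
    apply List.mem_flatMap.mpr
    refine ⟨p.1, PySem.List.mem_pyRange_one.mpr ⟨h1, h2⟩, ?_⟩
    apply List.mem_map.mpr
    refine ⟨p.2, List.mem_filter.mpr ⟨PySem.List.mem_pyRange_one.mpr ⟨h3, h4⟩, ?_⟩, rfl⟩
    apply decide_eq_true
    rw [pv_grid_getD L p.1 h1 h2, pv_row_getD L _ p.2 h3 h4]
    exact (pv_acell_ne_iff L _).mpr h5

lemma pv_NE_nil_iff (L : List (String × Int × Int)) (hL : L ≠ []) :
    pvNE L = [] ↔ pvVis L = [] := by
  have hb := pv_bounds_le L hL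
  constructor
  · intro hne
    by_contra hv
    rcases List.exists_mem_of_ne_nil _ hv with ⟨k, hk⟩
    have hkb := pv_vis_bounds L hL k hk
    have : (pvMaxY L - k.2, k.1 - pvMinX L) ∈ pvNE L := by
      rw [pv_mem_NE L hb.2.1]
      refine ⟨by omega, by unfold pvHN; omega, by omega, by unfold pvWN; omega, ?_⟩
      have : (pvMinX L + (k.1 - pvMinX L), pvMaxY L - (pvMaxY L - k.2)) = k := by
        ext <;> simp <;> omega
      rwa [this]
    rw [hne] at this
    simp at this
  · intro hv
    by_contra hne
    rcases List.exists_mem_of_ne_nil _ hne with ⟨p, hp⟩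
    have := ((pv_mem_NE L hb.2.1 p).mp hp).2.2.2.2
    rw [hv] at this
    simp at this

lemma pv_vis_ext_facts (L : List (String × Int × Int)) (hv : pvVis L ≠ []) :
    (∃ k ∈ pvVis L, k.1 = pvVx L) ∧ (∃ k ∈ pvVis L, k.1 = pvVX L) ∧
    (∃ k ∈ pvVis L, k.2 = pvVy L) ∧ (∃ k ∈ pvVis L, k.2 = pvVY L) ∧
    ∀ k ∈ pvVis L, pvVx L ≤ k.1 ∧ k.1 ≤ pvVX L ∧ pvVy L ≤ k.2 ∧ k.2 ≤ pvVY L := by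
  have h1 : (pvVis L).map (fun p => p.1) ≠ [] := by simpa using hv
  have h2 : (pvVis L).map (fun p => p.2) ≠ [] := by simpa using hv
  have e1 := pv_min_int _ h1; have e2 := pv_max_int _ h1
  have e3 := pv_min_int _ h2; have e4 := pv_max_int _ h2
  refine ⟨?_, ?_, ?_, ?_, ?_⟩
  · rcases List.mem_map.mp e1.1 with ⟨k, hk, hke⟩; exact ⟨k, hk, hke⟩
  · rcases List.mem_map.mp e2.1 with ⟨k, hk, hke⟩; exact ⟨k, hk, hke⟩
  · rcases List.mem_map.mp e3.1 with ⟨k, hk, hke⟩; exact ⟨k, hk, hke⟩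
  · rcases List.mem_map.mp e4.1 with ⟨k, hk, hke⟩; exact ⟨k, hk, hke⟩
  · intro k hk
    exact ⟨e1.2 _ (List.mem_map.mpr ⟨k, hk, rfl⟩), e2.2 _ (List.mem_map.mpr ⟨k, hk, rfl⟩),
      e3.2 _ (List.mem_map.mpr ⟨k, hk, rfl⟩), e4.2 _ (List.mem_map.mpr ⟨k, hk, rfl⟩)⟩

lemma pv_NE0_eq (L : List (String × Int × Int)) : pvNE0 L = pvNE L := pv_NE_eq L

lemma pv_crop_idx (L : List (String × Int × Int)) (hL : L ≠ []) (hv : pvVis L ≠ []) :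
    pvR0 L = pvMaxY L - pvVY L ∧ pvR1 L = pvMaxY L - pvVy L ∧
    pvC0 L = pvVx L - pvMinX L ∧ pvC1 L = pvVX L - pvMinX L := by
  have hb := pv_bounds_le L hL
  have hNE : pvNE L ≠ [] := fun h => hv ((pv_NE_nil_iff L hL).mp h)
  have hef := pv_vis_ext_facts L hv
  have hmemNE := pv_mem_NE L hb.2.1
  have hfstne : (pvNE L).map (fun p => p.1) ≠ [] := by simpa using hNE
  have hsndne : (pvNE L).map (fun p => p.2) ≠ [] := by simpa using hNE
  have eminf := pv_min_int _ hfstne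
  have emaxf := pv_max_int _ hfstne
  have emins := pv_min_int _ hsndne
  have emaxs := pv_max_int _ hsndne
  -- visible extreme points give NE members
  have hmk : ∀ k ∈ pvVis L, (pvMaxY L - k.2, k.1 - pvMinX L) ∈ pvNE L := by
    intro k hk
    have hkb := pv_vis_bounds L hL k hk
    rw [hmemNE]
    refine ⟨by omega, by unfold pvHN; omega, by omega, by unfold pvWN; omega, ?_⟩
    have : (pvMinX L + (k.1 - pvMinX L), pvMaxY L - (pvMaxY L - k.2)) = k := by
      ext <;> simp <;> omega
    rwa [this]
  -- NE members give visible points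
  have hmv : ∀ p ∈ pvNE L, (pvMinX L + p.2, pvMaxY L - p.1) ∈ pvVis L := by
    intro p hp; exact ((hmemNE p).mp hp).2.2.2.2
  have hboundsNE : ∀ p ∈ pvNE L,
      pvMaxY L - pvVY L ≤ p.1 ∧ p.1 ≤ pvMaxY L - pvVy L ∧
      pvVx L - pvMinX L ≤ p.2 ∧ p.2 ≤ pvVX L - pvMinX L := by
    intro p hp
    have hvv := hef.2.2.2.2 _ (hmv p hp)
    simp only at hvv
    omega
  refine ⟨?_, ?_, ?_, ?_⟩
  · rcases hef.2.2.2.1 with ⟨k, hk, hke⟩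
    have h1 : pvMaxY L - pvVY L ∈ (pvNE L).map (fun p => p.1) :=
      List.mem_map.mpr ⟨_, hmk k hk, by simp [hke]⟩
    have h2 := eminf.2 _ h1
    rcases List.mem_map.mp eminf.1 with ⟨p, hp, hpe⟩
    have := (hboundsNE p hp).1
    show (PySem.List.min? ((pvNE0 L).map (fun p => p.1)) (fun v => v)).getD 0 = _
    rw [pv_NE0_eq]
    omega
  · rcases hef.2.2.1 with ⟨k, hk, hke⟩
    have h1 : pvMaxY L - pvVy L ∈ (pvNE L).map (fun p => p.1) :=
      List.mem_map.mpr ⟨_, hmk k hk, by simp [hke]⟩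
    have h2 := emaxf.2 _ h1
    rcases List.mem_map.mp emaxf.1 with ⟨p, hp, hpe⟩
    have := (hboundsNE p hp).2.1
    show (PySem.List.max? ((pvNE0 L).map (fun p => p.1)) (fun v => v)).getD 0 = _
    rw [pv_NE0_eq]
    omega
  · rcases hef.1 with ⟨k, hk, hke⟩
    have h1 : pvVx L - pvMinX L ∈ (pvNE L).map (fun p => p.2) :=
      List.mem_map.mpr ⟨_, hmk k hk, by simp [hke]⟩
    have h2 := emins.2 _ h1
    rcases List.mem_map.mp emins.1 with ⟨p, hp, hpe⟩
    have := (hboundsNE p hp).2.2.1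
    show (PySem.List.min? ((pvNE0 L).map (fun p => p.2)) (fun v => v)).getD 0 = _
    rw [pv_NE0_eq]
    omega
  · rcases hef.2.1 with ⟨k, hk, hke⟩
    have h1 : pvVX L - pvMinX L ∈ (pvNE L).map (fun p => p.2) :=
      List.mem_map.mpr ⟨_, hmk k hk, by simp [hke]⟩
    have h2 := emaxs.2 _ h1
    rcases List.mem_map.mp emaxs.1 with ⟨p, hp, hpe⟩
    have := (hboundsNE p hp).2.2.2
    show (PySem.List.max? ((pvNE0 L).map (fun p => p.2)) (fun v => v)).getD 0 = _
    rw [pv_NE0_eq]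
    omega

lemma pv_getD_range_map {α : Type} (f : Nat → α) (n : Nat) (d : α) (i : Int)
    (h0 : 0 ≤ i) (hn : i < n) :
    PySem.List.pyGetD ((List.range n).map f) i d = f i.toNat := by
  rw [PySem.List.pyGetD_of_nonneg _ _ h0]
  have hlt : i.toNat < n := by omega
  rw [List.getD_eq_getElem?_getD]
  simp [List.getElem?_map, List.getElem?_range, hlt]

lemma pv_renderLabeled_repr (NR NC : Nat) (F : Nat → Nat → String)
    (hNR : NR ≠ 0) (hNC : NC ≠ 0) :
    pvRenderLabeled ((List.range NR).map (fun k => (List.range NC).map (F k)))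
      = PySem.Str.join "\n"
      (("    " ++ PySem.Str.join "  "
          ((List.range NC).map (fun (j : Nat) => "C" ++ PySem.Int.toStr ((j : Int) + 1)))) ::
        (List.range NR).map (fun (k : Nat) =>
          "R" ++ pvLjust2 ((k : Int) + 1) ++ PySem.Str.join "  " ((List.range NC).map (F k)))) := by
  obtain ⟨NR', rfl⟩ : ∃ m, NR = m + 1 := ⟨NR - 1, by omega⟩
  have hcons : (List.range (NR' + 1)).map (fun k => (List.range NC).map (F k))
      = ((List.range NC).map (F 0)) ::
        ((List.range NR').map (fun i => (List.range NC).map (F (i + 1)))) := by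
    rw [List.range_succ_eq_map, List.map_cons, List.map_map]
    rfl
  rw [hcons, pvRenderLabeled]
  have hg0ne : (List.range NC).map (F 0) ≠ [] := by
    intro h
    have := congrArg List.length h
    simp at this
    omega
  rw [if_neg hg0ne]
  have hlenM : PySem.List.len (((List.range NC).map (F 0)) ::
      ((List.range NR').map (fun i => (List.range NC).map (F (i + 1))))) = ((NR' + 1 : Nat) : Int) := by
    rw [PySem.List.len_eq]; simp
  have hlen0 : PySem.List.len ((List.range NC).map (F 0)) = ((NC : Nat) : Int) := by
    rw [PySem.List.len_eq]; simp
  simp only [← hcons]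
  have hlenM' : PySem.List.len ((List.range (NR' + 1)).map (fun k => (List.range NC).map (F k)))
      = ((NR' + 1 : Nat) : Int) := by
    rw [PySem.List.len_eq]; simp
  have hlen0' : PySem.List.len ((List.range NC).map (F 0)) = ((NC : Nat) : Int) := by
    rw [PySem.List.len_eq]; simp
  simp only [hlenM', hlen0', PySem.List.pyRange_zero_natCast, List.foldl_map,
    PySem.List.foldl_append_singleton_eq_map, List.map_map, List.singleton_append]
  apply congrArg (PySem.Str.join "\n")
  congr 1
  apply List.map_congr_left
  intro k hk
  have hk' : k < NR' + 1 := List.mem_range.mp hk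
  congr 1
  rw [pv_getD_range_map _ _ _ _ (by positivity) (by exact_mod_cast hk')]
  simp

lemma pv_vbounds (L : List (String × Int × Int)) (hL : L ≠ []) (hv : pvVis L ≠ []) :
    pvMinX L ≤ pvVx L ∧ pvVx L ≤ pvVX L ∧ pvVX L ≤ pvMaxX L ∧
    pvMinY L ≤ pvVy L ∧ pvVy L ≤ pvVY L ∧ pvVY L ≤ pvMaxY L := by
  have hef := pv_vis_ext_facts L hv
  rcases hef.1 with ⟨k1, hk1, he1⟩
  rcases hef.2.1 with ⟨k2, hk2, he2⟩
  rcases hef.2.2.1 with ⟨k3, hk3, he3⟩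
  rcases hef.2.2.2.1 with ⟨k4, hk4, he4⟩
  have hb1 := pv_vis_bounds L hL k1 hk1
  have hb2 := pv_vis_bounds L hL k2 hk2
  have hb3 := pv_vis_bounds L hL k3 hk3
  have hb4 := pv_vis_bounds L hL k4 hk4
  have ha1 := hef.2.2.2.2 k1 hk1
  have ha3 := hef.2.2.2.2 k3 hk3
  omega

lemma pv_cropped_repr (L : List (String × Int × Int)) (hL : L ≠ []) (hv : pvVis L ≠ []) :
    ((PySem.List.slice (pvGridA L) (some (pvMaxY L - pvVY L)) (some ((pvMaxY L - pvVy L) + 1))).map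
      (fun row => PySem.List.slice row (some (pvVx L - pvMinX L)) (some ((pvVX L - pvMinX L) + 1))))
    = (List.range ((pvVY L - pvVy L + 1).toNat)).map (fun (k : Nat) =>
        (List.range ((pvVX L - pvVx L + 1).toNat)).map (fun (c : Nat) =>
          pvACell L (pvVx L + (c : Int), pvVY L - (k : Int)))) := by
  have hvb := pv_vbounds L hL hv
  rw [pv_grid_repr]
  rw [pv_slice_range_map _ (by omega) (by omega) (by unfold pvHN; omega)]
  rw [List.map_map]
  rw [show (pvMaxY L - pvVy L + 1).toNat - (pvMaxY L - pvVY L).toNat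
      = (pvVY L - pvVy L + 1).toNat from by omega]
  apply List.map_congr_left
  intro k hk
  simp only [Function.comp_apply]
  rw [pv_row_repr]
  rw [pv_slice_range_map _ (by omega) (by omega) (by unfold pvWN; omega)]
  rw [show (pvVX L - pvMinX L + 1).toNat - (pvVx L - pvMinX L).toNat
      = (pvVX L - pvVx L + 1).toNat from by omega]
  apply List.map_congr_left
  intro c hc
  show pvACell L _ = pvACell L _
  congr 2
  · push_cast
    omega
  · push_cast
    omega

set_option maxHeartbeats 1000000 in
lemma pv_B_main (L : List (String × Int × Int)) (hL : L ≠ []) (hs : ∀ p ∈ L, p.1 ≠ "")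
    (hv : pvVis L ≠ []) :
    PySem.Str.join "\n"
      ((PySem.List.enumerate (PySem.List.pyRange (pvVY L) (pvVy L - 1) (-1)) 0).foldl (fun ls iy =>
        ls ++ ["R" ++ pvLjust2 (iy.1 + 1) ++ PySem.Str.join "  "
          ((PySem.List.pyRange (pvVx L) (pvVX L + 1) 1).map (fun x =>
            let t := PySem.Dict.getD (pvTextDict L) (x, iy.2) ""
            if t = "" then "_" else t))])
        ["    " ++ PySem.Str.join "  "
          ((PySem.List.pyRange 0 (pvVX L - pvVx L + 1) 1).map (fun j => "C" ++ PySem.Int.toStr (j + 1)))])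
    = PySem.Str.join "\n"
      (("    " ++ PySem.Str.join "  "
          ((List.range ((pvVX L - pvVx L + 1).toNat)).map (fun (j : Nat) => "C" ++ PySem.Int.toStr ((j : Int) + 1)))) ::
        (List.range ((pvVY L - pvVy L + 1).toNat)).map (fun (k : Nat) =>
          "R" ++ pvLjust2 ((k : Int) + 1) ++ PySem.Str.join "  "
            ((List.range ((pvVX L - pvVx L + 1).toNat)).map (fun (c : Nat) =>
              pvACell L (pvVx L + (c : Int), pvVY L - (k : Int)))))) := by
  have hvb := pv_vbounds L hL hv
  obtain ⟨vx, hvx⟩ : ∃ v, pvVx L = v := ⟨_, rfl⟩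
  obtain ⟨vX, hvX⟩ : ∃ v, pvVX L = v := ⟨_, rfl⟩
  obtain ⟨vy, hvy⟩ : ∃ v, pvVy L = v := ⟨_, rfl⟩
  obtain ⟨vY, hvY⟩ : ∃ v, pvVY L = v := ⟨_, rfl⟩
  rw [hvx, hvX, hvy, hvY] at hvb ⊢
  apply congrArg (PySem.Str.join "\n")
  rw [PySem.List.enumerate_eq_map_pyRange _ (0 : Int), List.foldl_map,
    PySem.List.foldl_append_singleton_eq_map]
  have hlen : PySem.List.len (PySem.List.pyRange vY (vy - 1) (-1))
      = (((vY - vy + 1).toNat : Nat) : Int) := by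
    rw [PySem.List.len_eq, PySem.List.length_pyRange_neg_one]
    congr 1
    omega
  rw [hlen, PySem.List.pyRange_zero_natCast, List.map_map, List.singleton_append]
  congr 1
  · rw [show vX - vx + 1 = (((vX - vx + 1).toNat : Nat) : Int) from by omega,
      PySem.List.pyRange_zero_natCast, List.map_map]
    simp only [Function.comp_def]
    rw [show ((((vX - vx + 1).toNat : Nat) : Int)).toNat = (vX - vx + 1).toNat from by omega]
  · apply List.map_congr_left
    intro k hk
    have hk' : k < (vY - vy + 1).toNat := List.mem_range.mp hk
    simp only [Function.comp_apply]
    have hy : PySem.List.pyGetD (PySem.List.pyRange vY (vy - 1) (-1)) ((k : Nat) : Int) 0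
        = vY - k := by
      rw [PySem.List.pyRange_neg_one, pv_getD_range_map _ _ _ _ (by positivity) (by push_cast; omega)]
      simp
    rw [hy]
    congr 1
    apply congrArg (PySem.Str.join "  ")
    rw [PySem.List.pyRange_one, List.map_map]
    rw [show (vX + 1 - vx).toNat = (vX - vx + 1).toNat from by omega]
    apply List.map_congr_left
    intro c hc
    simp only [Function.comp_apply]
    exact pv_bcell_eq L hs _

lemma pv_core (L : List (String × Int × Int)) (hs : ∀ p ∈ L, p.1 ≠ "") :
    pvCanonA L = pvCanonB L := by
  by_cases hL : L = []
  · subst hL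
    have hvnil : pvVis ([] : List (String × Int × Int)) = [] := by
      rw [pv_vis_eq, pv_cell_keys]
      rfl
    rw [pvCanonA, if_pos rfl, pvCanonB, if_pos hvnil]
  · have hb := pv_bounds_le L hL
    have hkept : pvSorted (L.map (fun p => p.1)) ≠ [] := by
      unfold pvSorted
      rw [Ne, PySem.List.sorted_eq_nil_iff]
      simpa using hL
    have hgridne : pvGridA L ≠ [] := by
      intro h
      have hlen := pv_grid_len L
      rw [h] at hlen
      simp at hlen
      unfold pvHN at hlen
      omega
    have hheadne : (pvGridA L).headD [] ≠ [] := by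
      rw [pv_head_grid L hb.2.1]
      intro h
      have hlen := pv_row_len L (pvMaxY L)
      rw [h] at hlen
      simp at hlen
      unfold pvWN at hlen
      omega
    rw [pvCanonA, if_neg hL,
      if_neg (by rintro (h | h | h); exacts [hkept h, hgridne h, hheadne h])]
    by_cases hv : pvVis L = []
    · have hne0 : pvNE0 L = [] := by
        rw [pv_NE0_eq]
        exact (pv_NE_nil_iff L hL).mpr hv
      rw [if_pos hne0, pvCanonB, if_pos hv]
    · have hne0 : pvNE0 L ≠ [] := by
        rw [pv_NE0_eq]
        exact fun h => hv ((pv_NE_nil_iff L hL).mp h)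
      rw [if_neg hne0]
      have hci := pv_crop_idx L hL hv
      rw [hci.1, hci.2.1, hci.2.2.1, hci.2.2.2]
      rw [pv_cropped_repr L hL hv]
      have hvb := pv_vbounds L hL hv
      refine (pv_renderLabeled_repr ((pvVY L - pvVy L + 1).toNat) ((pvVX L - pvVx L + 1).toNat)
        (fun k c => pvACell L (pvVx L + (c : Int), pvVY L - (k : Int)))
        (by omega) (by omega)).trans ?_
      rw [pvCanonB, if_neg hv]
      exact (pv_B_main L hL hs hv).symm

lemma pv_final (coords : List (String × Int × Int)) (ks : String × String) :
    render_pruned_grid_str coords ks = render_pruned_grid_str_alt coords ks := by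
  rw [pv_A_eq, pv_B_eq]
  exact pv_core _ (pv_Lof_sym_ne coords ks)

-- ===== VERDICT (by name: the statement is the Claim_ definition above) =====
theorem render_pruned_grid_str_spec : Claim_equal_render_pruned_grid_str := by
  intro coords ks _hdom
  show render_pruned_grid_str coords ks = render_pruned_grid_str_alt coords ks
  exact pv_final coords ks
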